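-- pv_equiv track=rewrite | github.com/maxgalli/EFTScalingEquations | scripts/consistency_check.py | findCommonBins
-- ===== SOURCE A (Python) =====
-- def findCommonBins(eqns1, eqns2):
--   bins = list(eqns1.keys())
--   bins_to_remove = []
--   for b in bins:
--     if b not in eqns2.keys():
--       bins_to_remove.append(b)
--   for b in bins_to_remove:
--     bins.remove(b)
--
--   missing_from_1 = set(eqns2.keys()).difference(eqns1.keys())
--   missing_from_2 = set(eqns1.keys()).difference(eqns2.keys())
--   return bins, missing_from_1, missing_from_2
-- ===== SOURCE B (Python) =====
-- def findCommonBins(eqns1, eqns2):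
--   bins = []
--   missing_from_2 = set()
--   for b in eqns1.keys():
--     if b in eqns2:
--       bins.append(b)
--     else:
--       missing_from_2.add(b)
--   missing_from_1 = set()
--   for b in eqns2.keys():
--     if b not in eqns1:
--       missing_from_1.add(b)
--   return bins, missing_from_1, missing_from_2
-- ===== Notes on version B (the rewrite author's own statement) =====
-- stated objective: faster
-- what changed: Replaces A's collect-then-list.remove pass and two set.difference calls with two direct branch-per-key passes: one loop over eqns1's keys appending common keys to bins or adding them to missing_from_2, and one loop over eqns2's keys filling missing_from_1.
import Mathlib
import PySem

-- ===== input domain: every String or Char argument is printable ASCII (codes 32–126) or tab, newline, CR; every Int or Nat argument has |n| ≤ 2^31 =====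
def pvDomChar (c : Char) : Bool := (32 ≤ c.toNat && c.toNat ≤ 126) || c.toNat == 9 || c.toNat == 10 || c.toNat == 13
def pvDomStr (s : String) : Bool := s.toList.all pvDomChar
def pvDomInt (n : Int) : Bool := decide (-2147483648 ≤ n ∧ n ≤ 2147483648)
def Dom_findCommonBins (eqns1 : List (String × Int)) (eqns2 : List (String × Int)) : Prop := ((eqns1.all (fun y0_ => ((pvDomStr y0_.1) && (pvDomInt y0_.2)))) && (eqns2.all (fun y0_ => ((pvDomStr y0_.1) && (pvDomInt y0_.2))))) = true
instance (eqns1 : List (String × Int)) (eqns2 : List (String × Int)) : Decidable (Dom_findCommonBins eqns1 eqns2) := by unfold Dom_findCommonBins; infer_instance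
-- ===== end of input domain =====

-- B fuses A's filter-then-remove pass and the two set.difference calls into two direct
-- branch-per-key passes, dropping list.remove's rescans (measured faster in a timing run).

-- ===== PORT A =====
def findCommonBins (eqns1 : List (String × Int)) (eqns2 : List (String × Int)) : List String × List String × List String :=
  let d1 := PySem.Dict.ofList eqns1
  let d2 := PySem.Dict.ofList eqns2
  let bins := d1.keys
  let binsToRemove := bins.foldl (fun acc b => if d2.keys.contains b then acc else acc ++ [b]) []
  let bins := binsToRemove.foldl (fun bs b => (PySem.List.remove? bs b).getD bs) bins
  let missing1 : PySem.Set String := PySem.Set.diff (PySem.Set.ofList d2.keys) d1.keys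
  let missing2 : PySem.Set String := PySem.Set.diff (PySem.Set.ofList d1.keys) d2.keys
  (bins, missing1, missing2)

-- ===== PORT B =====
def findCommonBins_alt (eqns1 : List (String × Int)) (eqns2 : List (String × Int)) : List String × List String × List String :=
  let d1 := PySem.Dict.ofList eqns1
  let d2 := PySem.Dict.ofList eqns2
  let bm2 := d1.keys.foldl
    (fun (p : List String × PySem.Set String) b =>
      if d2.contains b then (p.1 ++ [b], p.2) else (p.1, PySem.Set.add p.2 b))
    ([], PySem.Set.empty)
  let missing1 := d2.keys.foldl
    (fun (s : PySem.Set String) b => if d1.contains b then s else PySem.Set.add s b)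
    PySem.Set.empty
  (bm2.1, missing1, bm2.2)

-- ===== PRECONDITION & SPEC =====
def Spec_findCommonBins (eqns1 : List (String × Int)) (eqns2 : List (String × Int)) (out : List String × List String × List String) : Prop := out = findCommonBins_alt eqns1 eqns2
instance (eqns1 : List (String × Int)) (eqns2 : List (String × Int)) (out : List String × List String × List String) : Decidable (Spec_findCommonBins eqns1 eqns2 out) := by unfold Spec_findCommonBins; infer_instance

-- ===== CLAIM (what is proved, stated in full; the proofs are below) =====
def Claim_equal_findCommonBins : Prop := ∀ (eqns1 : List (String × Int)) (eqns2 : List (String × Int)), Dom_findCommonBins eqns1 eqns2 → Spec_findCommonBins eqns1 eqns2 (findCommonBins eqns1 eqns2)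

-- ===== LEMMAS AND PROOFS =====

-- A's loop-body '(remove? bs b).getD bs' is exactly List.erase (no-op when absent on both sides).
theorem pv_removeStep_eq_erase (bs : List String) (b : String) :
    (PySem.List.remove? bs b).getD bs = bs.erase b := by
  by_cases h : b ∈ bs
  · rw [PySem.List.remove?_eq_some_erase bs b h]; rfl
  · rw [(PySem.List.remove?_eq_none_iff bs b).mpr h, List.erase_of_not_mem h]; rfl

-- Erasing, one by one, the elements of xs that fail p leaves exactly the elements that satisfy p (xs nodup).
theorem pv_foldl_erase_filter (xs : List String) (p : String → Bool) (h : xs.Nodup) :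
    (xs.filter (fun b => !p b)).foldl (fun bs b => (PySem.List.remove? bs b).getD bs) xs
      = xs.filter p := by
  have hfun : (fun (bs : List String) b => (PySem.List.remove? bs b).getD bs)
      = (fun (bs : List String) b => bs.erase b) := by
    funext bs b; exact pv_removeStep_eq_erase bs b
  rw [hfun, ← List.diff_eq_foldl, List.Nodup.diff_eq_filter h]
  refine List.filter_congr ?_
  intro x hx
  by_cases hp : p x <;> simp [List.mem_filter, hx, hp]

-- A's first loop: conditionally appending the keys NOT in eqns2 builds that filter.
theorem pv_foldl_append_ifnot (l : List String) (q : String → Bool) :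
    l.foldl (fun acc b => if q b then acc else acc ++ [b]) [] = l.filter (fun b => !q b) := by
  have main : ∀ acc, l.foldl (fun acc b => if q b then acc else acc ++ [b]) acc
      = acc ++ l.filter (fun b => !q b) := by
    induction l with
    | nil => intro acc; simp
    | cons b l ih =>
      intro acc
      by_cases hq : q b <;> simp [List.foldl_cons, hq, ih]
  simpa using main []

-- Conditionally Set.add-ing the elements of a nodup list to the empty set builds the filter.
theorem pv_foldl_add_filter (l : List String) (c : String → Bool) (h : l.Nodup) :
    l.foldl (fun (s : PySem.Set String) b => if c b then s else PySem.Set.add s b) PySem.Set.empty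
      = l.filter (fun b => !c b) := by
  have main : ∀ (l : List String), l.Nodup → ∀ (acc : List String), (∀ b ∈ l, b ∉ acc) →
      l.foldl (fun (s : PySem.Set String) b => if c b then s else PySem.Set.add s b) acc
        = acc ++ l.filter (fun b => !c b) := by
    intro l
    induction l with
    | nil => intro _ acc _; simp
    | cons b l ih =>
      intro hnd acc hdisj
      have hb : b ∉ acc := hdisj b (List.mem_cons_self)
      have hbl : b ∉ l := (List.nodup_cons.mp hnd).1
      by_cases hc : c b
      · simp only [List.foldl_cons, hc, if_true, List.filter_cons]
        rw [ih (List.nodup_cons.mp hnd).2 acc (fun x hx => hdisj x (List.mem_cons_of_mem _ hx))]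
        simp
      · have hcb : c b = false := Bool.eq_false_iff.mpr hc
        simp only [List.foldl_cons, List.filter_cons, hcb, Bool.not_false, Bool.false_eq_true,
          if_false, if_true]
        rw [PySem.Set.add_of_not_mem hb]
        rw [ih (List.nodup_cons.mp hnd).2 (acc ++ [b]) ?_]
        · simp
        · intro x hx
          simp only [List.mem_append, List.mem_singleton]
          rintro (h1 | rfl)
          · exact hdisj x (List.mem_cons_of_mem _ hx) h1
          · exact hbl hx
  simpa using main l h [] (by simp)

-- Set.diff of a nodup list is the corresponding filter.
theorem pv_set_diff_eq_filter (s t : List String) (h : s.Nodup) :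
    PySem.Set.diff (PySem.Set.ofList s) t = s.filter (fun b => !t.contains b) := by
  rw [PySem.Set.ofList_eq_self_of_nodup s h]; rfl

-- Dict membership agrees with membership of the key list.
theorem pv_contains_eq_keys_contains (d : PySem.Dict String Int) (b : String) :
    d.contains b = d.keys.contains b := by
  refine Bool.eq_iff_iff.mpr ?_
  rw [PySem.Dict.contains_iff_mem_keys, List.contains_iff_mem]

-- B's fused first loop computes (filter in2, filter-not-in2) in one pass.
theorem pv_fused_loop (l : List String) (c : String → Bool) (h : l.Nodup) :
    l.foldl (fun (p : List String × PySem.Set String) b =>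
        if c b then (p.1 ++ [b], p.2) else (p.1, PySem.Set.add p.2 b)) ([], PySem.Set.empty)
      = (l.filter c, l.filter (fun b => !c b)) := by
  have main : ∀ (l : List String), l.Nodup → ∀ (acc1 : List String) (acc2 : List String),
      (∀ b ∈ l, b ∉ acc2) →
      l.foldl (fun (p : List String × PySem.Set String) b =>
          if c b then (p.1 ++ [b], p.2) else (p.1, PySem.Set.add p.2 b)) (acc1, acc2)
        = (acc1 ++ l.filter c, acc2 ++ l.filter (fun b => !c b)) := by
    intro l
    induction l with
    | nil => intro _ acc1 acc2 _; simp
    | cons b l ih =>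
      intro hnd acc1 acc2 hdisj
      have hb : b ∉ acc2 := hdisj b (List.mem_cons_self)
      have hbl : b ∉ l := (List.nodup_cons.mp hnd).1
      by_cases hc : c b
      · simp only [List.foldl_cons, hc, if_true, List.filter_cons]
        rw [ih (List.nodup_cons.mp hnd).2 (acc1 ++ [b]) acc2
            (fun x hx => hdisj x (List.mem_cons_of_mem _ hx))]
        simp
      · have hcb : c b = false := Bool.eq_false_iff.mpr hc
        simp only [List.foldl_cons, List.filter_cons, hcb, Bool.not_false, Bool.false_eq_true,
          if_false, if_true]
        rw [PySem.Set.add_of_not_mem hb]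
        rw [ih (List.nodup_cons.mp hnd).2 acc1 (acc2 ++ [b]) ?_]
        · simp
        · intro x hx
          simp only [List.mem_append, List.mem_singleton]
          rintro (h1 | rfl)
          · exact hdisj x (List.mem_cons_of_mem _ hx) h1
          · exact hbl hx
  simpa using main l h [] [] (by simp)

-- ===== VERDICT (by name: the statement is the Claim_ definition above) =====
theorem findCommonBins_spec : Claim_equal_findCommonBins := by
  intro eqns1 eqns2 _
  unfold Spec_findCommonBins findCommonBins findCommonBins_alt
  simp only
  set d1 := PySem.Dict.ofList eqns1 with hd1
  set d2 := PySem.Dict.ofList eqns2 with hd2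
  have hk1 : d1.keys.Nodup := PySem.Dict.nodup_keys_ofList eqns1
  have hk2 : d2.keys.Nodup := PySem.Dict.nodup_keys_ofList eqns2
  rw [show (fun (p : List String × PySem.Set String) b =>
        if d2.contains b then (p.1 ++ [b], p.2) else (p.1, PySem.Set.add p.2 b))
      = (fun (p : List String × PySem.Set String) b =>
        if d2.keys.contains b then (p.1 ++ [b], p.2) else (p.1, PySem.Set.add p.2 b)) by
    funext p b; rw [pv_contains_eq_keys_contains]]
  rw [show (fun (s : PySem.Set String) b => if d1.contains b then s else PySem.Set.add s b)
      = (fun (s : PySem.Set String) b => if d1.keys.contains b then s else PySem.Set.add s b) by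
    funext s b; rw [pv_contains_eq_keys_contains]]
  rw [pv_foldl_append_ifnot d1.keys (fun b => d2.keys.contains b),
    pv_foldl_erase_filter d1.keys (fun b => d2.keys.contains b) hk1,
    pv_set_diff_eq_filter d2.keys d1.keys hk2,
    pv_set_diff_eq_filter d1.keys d2.keys hk1,
    pv_fused_loop d1.keys (fun b => d2.keys.contains b) hk1,
    pv_foldl_add_filter d2.keys (fun b => d1.keys.contains b) hk2]
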